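-- pv_equiv track=rewrite | github.com/kipackjeongMS/DuckyAI | cli/duckyai_cli/main/orch_cmd.py | _looks_like_orchestrator_cmd
-- ===== SOURCE A (Python) =====
-- def _looks_like_orchestrator_cmd(cmdline: list[str]) -> bool:
--     """Identify a DuckyAI orchestrator daemon command line."""
--     if not cmdline:
--         return False
--
--     normalized = [str(part).lower() for part in cmdline if part]
--     joined = " ".join(normalized)
--     if "duckyai" not in joined and "duckyai_cli" not in joined:
--         return False
--     return "-o" in normalized
-- ===== SOURCE B (Python) =====
-- def _looks_like_orchestrator_cmd(cmdline: list[str]) -> bool: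
--     """Identify a DuckyAI orchestrator daemon command line (single pass, no join)."""
--     has_marker = False
--     has_o = False
--     for part in cmdline:
--         if not part:
--             continue
--         p = str(part).lower()
--         if "duckyai" in p:
--             has_marker = True
--         if p == "-o":
--             has_o = True
--     return has_marker and has_o
-- ===== Notes on version B (the rewrite author's own statement) =====
-- stated objective: simpler
-- what changed: Replaces the list-comprehension + space-join + two substring tests + list membership with one pass over cmdline keeping two flags, using that the space-free 'duckyai' occurs in the joined string iff it occurs in some part and that 'duckyai_cli' is subsumed by 'duckyai'.
import Mathlib
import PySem

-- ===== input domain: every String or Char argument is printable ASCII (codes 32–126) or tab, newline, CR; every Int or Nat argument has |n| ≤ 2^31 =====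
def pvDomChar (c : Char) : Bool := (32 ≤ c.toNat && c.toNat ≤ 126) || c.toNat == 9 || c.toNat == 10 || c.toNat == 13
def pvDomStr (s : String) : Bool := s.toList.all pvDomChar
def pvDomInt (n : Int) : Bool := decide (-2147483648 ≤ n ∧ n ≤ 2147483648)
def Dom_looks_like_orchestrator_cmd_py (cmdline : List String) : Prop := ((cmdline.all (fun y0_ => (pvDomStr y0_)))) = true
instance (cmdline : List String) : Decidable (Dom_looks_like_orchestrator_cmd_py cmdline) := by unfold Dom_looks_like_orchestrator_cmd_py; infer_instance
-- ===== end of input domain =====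

-- B replaces A's list-build + space-join + substring tests + list membership by one pass over
-- cmdline keeping two flags ('duckyai' is space-free, so per-part search equals search in the join).

-- ===== PORT A =====
def looks_like_orchestrator_cmd_py (cmdline : List String) : Bool :=
  if cmdline = [] then false
  else
    let normalized := (cmdline.filter (fun part => !(part == ""))).map (fun part => PySem.Str.lower part)
    let joined := PySem.Str.join " " normalized
    if !(PySem.Str.isIn "duckyai" joined) && !(PySem.Str.isIn "duckyai_cli" joined) then false
    else normalized.contains "-o"

-- ===== PORT B =====
def looks_like_orchestrator_cmd_py_alt (cmdline : List String) : Bool :=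
  let st := cmdline.foldl (fun (st : Bool × Bool) part =>
      if part == "" then st
      else
        let p := PySem.Str.lower part
        (st.1 || PySem.Str.isIn "duckyai" p, st.2 || p == "-o")) (false, false)
  st.1 && st.2

-- ===== PRECONDITION & SPEC =====
def Spec_looks_like_orchestrator_cmd_py (cmdline : List String) (out : Bool) : Prop := out = looks_like_orchestrator_cmd_py_alt cmdline
instance (cmdline : List String) (out : Bool) : Decidable (Spec_looks_like_orchestrator_cmd_py cmdline out) := by unfold Spec_looks_like_orchestrator_cmd_py; infer_instance

-- ===== CLAIM (what is proved, stated in full; the proofs are below) =====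
def Claim_equal_looks_like_orchestrator_cmd_py : Prop := ∀ (cmdline : List String), Dom_looks_like_orchestrator_cmd_py cmdline → Spec_looks_like_orchestrator_cmd_py cmdline (looks_like_orchestrator_cmd_py cmdline)

-- ===== LEMMAS AND PROOFS =====

-- A prefix of a ++ c :: b not containing c is a prefix of a.
theorem pv_prefix_split (cs a b : List Char) (c : Char) :
    c ∉ cs → cs <+: a ++ c :: b → cs <+: a := by
  induction cs generalizing a with
  | nil => exact fun _ _ => List.nil_prefix
  | cons y ys ih =>
    intro hc h
    rw [List.mem_cons, not_or] at hc
    cases a with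
    | nil =>
      rw [List.nil_append, List.cons_prefix_cons] at h
      exact absurd h.1.symm hc.1
    | cons z a' =>
      rw [List.cons_append, List.cons_prefix_cons] at h
      exact List.cons_prefix_cons.mpr ⟨h.1, ih a' hc.2 h.2⟩

-- An infix not containing c cannot straddle the separator c.
theorem pv_infix_split (cs a b : List Char) (c : Char) (hc : c ∉ cs) :
    cs <:+: a ++ c :: b ↔ cs <:+: a ∨ cs <:+: b := by
  constructor
  · induction a with
    | nil =>
      intro h
      rw [List.nil_append, List.infix_cons_iff] at h
      rcases h with h | h
      · have : cs = [] := List.prefix_nil.mp (pv_prefix_split cs [] b c hc h)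
        exact Or.inl (this ▸ List.nil_infix)
      · exact Or.inr h
    | cons z a' ih =>
      intro h
      rw [List.cons_append, List.infix_cons_iff] at h
      rcases h with h | h
      · exact Or.inl (pv_prefix_split cs (z :: a') b c hc h).isInfix
      · rcases ih h with h' | h'
        · exact Or.inl (List.infix_cons h')
        · exact Or.inr h'
  · rintro (h | h)
    · exact h.trans ⟨[], c :: b, rfl⟩
    · exact h.trans ((List.suffix_cons c b).trans (List.suffix_append a (c :: b))).isInfix

-- A nonempty, space-free pattern is an infix of the space-join iff it is an infix of some part.
theorem pv_infix_join {cs : List Char} (parts : List (List Char)) (hne : cs ≠ [])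
    (hsp : (' ' : Char) ∉ cs) :
    cs <:+: PySem.Chars.join [' '] parts ↔ ∃ p ∈ parts, cs <:+: p := by
  induction parts with
  | nil => simp [PySem.Chars.join_nil, List.infix_nil, hne]
  | cons p rest ih =>
    cases rest with
    | nil => simp [PySem.Chars.join_singleton]
    | cons q rest' =>
      rw [PySem.Chars.join_cons_cons, List.append_assoc, List.singleton_append,
        pv_infix_split cs p _ ' ' hsp, ih]
      simp only [List.mem_cons]
      constructor
      · rintro (h | ⟨r, hr, h⟩)
        · exact ⟨p, Or.inl rfl, h⟩
        · exact ⟨r, Or.inr hr, h⟩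
      · rintro ⟨r, (rfl | hr), h⟩
        · exact Or.inl h
        · exact Or.inr ⟨r, hr, h⟩

-- The joined-string substring test equals a per-part test.
theorem pv_isIn_join (sub : String) (ns : List String) (hne : sub.toList ≠ [])
    (hsp : (' ' : Char) ∉ sub.toList) :
    PySem.Str.isIn sub (PySem.Str.join " " ns) = ns.any (fun s => PySem.Str.isIn sub s) := by
  rcases h : ns.any (fun s => PySem.Str.isIn sub s) with _ | _
  · rw [Bool.eq_false_iff]
    intro hin
    rw [PySem.Str.isIn_iff_infix, PySem.Str.toList_join] at hin
    rcases (pv_infix_join _ hne hsp).mp (by simpa using hin) with ⟨p, hp, hinf⟩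
    rcases List.mem_map.mp hp with ⟨s, hs, rfl⟩
    have hss : PySem.Str.isIn sub s = true := (PySem.Str.isIn_iff_infix _ _).mpr hinf
    have := List.any_eq_true.mpr ⟨s, hs, hss⟩
    simp [h] at this
  · rcases List.any_eq_true.mp h with ⟨s, hs, hin⟩
    rw [PySem.Str.isIn_iff_infix, PySem.Str.toList_join]
    refine (pv_infix_join _ hne hsp).mpr ⟨s.toList, List.mem_map_of_mem hs, ?_⟩
    exact (PySem.Str.isIn_iff_infix _ _).mp hin

-- B's flag loop computes the two per-part 'any' tests over the non-empty parts.
theorem pv_fold_spec (cmdline : List String) (b1 b2 : Bool) :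
    cmdline.foldl (fun (st : Bool × Bool) part =>
      if part == "" then st
      else
        let p := PySem.Str.lower part
        (st.1 || PySem.Str.isIn "duckyai" p, st.2 || p == "-o")) (b1, b2) =
    (b1 || (cmdline.filter (fun part => !(part == ""))).any
        (fun part => PySem.Str.isIn "duckyai" (PySem.Str.lower part)),
     b2 || (cmdline.filter (fun part => !(part == ""))).any
        (fun part => PySem.Str.lower part == "-o")) := by
  induction cmdline generalizing b1 b2 with
  | nil => simp
  | cons x t ih =>
    rw [List.foldl_cons]
    by_cases hx : x = ""
    · rw [if_pos (show (x == "") = true by simp [hx]), ih,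
        List.filter_cons_of_neg (by simp [hx])]
    · rw [if_neg (show ¬ (x == "") = true by simp [hx])]
      show List.foldl _ (b1 || _, b2 || _) t = _
      rw [ih, List.filter_cons_of_pos (by simp [hx])]
      simp only [List.any_cons, ← Bool.or_assoc]

theorem looks_like_orchestrator_cmd_py_eq_alt (cmdline : List String) :
    looks_like_orchestrator_cmd_py cmdline = looks_like_orchestrator_cmd_py_alt cmdline := by
  unfold looks_like_orchestrator_cmd_py looks_like_orchestrator_cmd_py_alt
  rw [pv_fold_spec]
  by_cases hnil : cmdline = []
  · subst hnil; rfl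
  · rw [if_neg hnil]
    dsimp only
    simp only [Bool.false_or]
    set l := cmdline.filter (fun part => !(part == "")) with hl
    set ns := l.map (fun part => PySem.Str.lower part) with hns
    have hany : ∀ sub : String, sub.toList ≠ [] → (' ' : Char) ∉ sub.toList →
        PySem.Str.isIn sub (PySem.Str.join " " ns) =
          l.any (fun part => PySem.Str.isIn sub (PySem.Str.lower part)) := by
      intro sub h1 h2
      rw [pv_isIn_join sub ns h1 h2, hns, List.any_map]
      rfl
    have hd := hany "duckyai" (by decide) (by decide)
    have hsub : PySem.Str.isIn "duckyai_cli" (PySem.Str.join " " ns) = true →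
        PySem.Str.isIn "duckyai" (PySem.Str.join " " ns) = true := by
      intro h
      rw [PySem.Str.isIn_iff_infix] at h ⊢
      exact List.IsInfix.trans (by decide) h
    have hcontains : ns.contains "-o" = l.any (fun part => PySem.Str.lower part == "-o") := by
      rw [hns, List.contains_eq_any_beq, List.any_map]
      exact congrArg _ (funext fun part => by simp [eq_comm])
    rcases hX : l.any (fun part => PySem.Str.isIn "duckyai" (PySem.Str.lower part)) with _ | _
    · have h1 : PySem.Str.isIn "duckyai" (PySem.Str.join " " ns) = false := hd.trans hX
      have h2 : PySem.Str.isIn "duckyai_cli" (PySem.Str.join " " ns) = false := by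
        rcases h : PySem.Str.isIn "duckyai_cli" (PySem.Str.join " " ns) with _ | _
        · rfl
        · rw [hsub h] at h1; exact h1
      rw [h1, h2]
      rw [if_pos (by simp)]
      rw [Bool.false_and]
    · have h1 : PySem.Str.isIn "duckyai" (PySem.Str.join " " ns) = true := hd.trans hX
      rw [h1]
      rw [if_neg (by simp)]
      rw [hcontains, Bool.true_and]

-- ===== VERDICT (by name: the statement is the Claim_ definition above) =====
theorem looks_like_orchestrator_cmd_py_spec : Claim_equal_looks_like_orchestrator_cmd_py := by
  intro cmdline _
  unfold Spec_looks_like_orchestrator_cmd_py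
  exact looks_like_orchestrator_cmd_py_eq_alt cmdline
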